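-- pv_equiv track=rewrite | github.com/RDEENA/Coding_Skills | 2264. Largest 3-Same-Digit Number in String.py | largestGoodInteger
-- ===== SOURCE A (Python) =====
-- def largestGoodInteger(num: str) -> str:
--     l1 = ['111', '222', '333', '444', '555', '666', '777', '888', '999', '000']
--     res = []
--     int_arr = []
--
--     for i in range(len(num) - 2):
--         if num[i:i + 3] in l1:
--             res.append(num[i:i + 3])
--
--     if not res:
--         return ""
--
--     if all(int(x) == 0 for x in res):
--         return '000'
--
--     for i in res:
--         int_arr.append(int(i))
--
--     res = max(int_arr)
--     return str(res)
-- ===== SOURCE B (Python) =====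
-- def largestGoodInteger(num: str) -> str:
--     for d in range(9, -1, -1):
--         triple = str(d) * 3
--         if triple in num:
--             return triple
--     return ""
-- ===== Notes on version B (the rewrite author's own statement) =====
-- stated objective: simpler
-- what changed: Instead of scanning every 3-char window, collecting matches, special-casing the all-zero case and taking the max of the parsed ints, B tries the ten candidate same-digit triples in descending digit order and returns the first one that occurs as a substring.
import Mathlib
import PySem

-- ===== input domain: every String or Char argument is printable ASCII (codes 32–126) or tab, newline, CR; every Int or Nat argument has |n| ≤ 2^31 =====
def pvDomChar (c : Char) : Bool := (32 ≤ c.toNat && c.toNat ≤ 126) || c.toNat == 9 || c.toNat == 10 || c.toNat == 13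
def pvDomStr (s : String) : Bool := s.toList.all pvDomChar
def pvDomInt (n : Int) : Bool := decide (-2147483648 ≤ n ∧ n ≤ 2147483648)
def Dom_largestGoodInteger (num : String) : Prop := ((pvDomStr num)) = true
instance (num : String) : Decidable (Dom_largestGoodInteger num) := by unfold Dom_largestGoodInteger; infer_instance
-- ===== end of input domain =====

-- B replaces A's window scan + collect + all-zero special case + max-of-ints with a descending
-- loop over the ten candidate triples '999'..'000', returning the first that is a substring (objective: simpler).

-- ===== PORT A =====
def largestGoodInteger (num : String) : String :=
  let l1 : List String := ["111","222","333","444","555","666","777","888","999","000"]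
  let res : List String := (PySem.List.pyRange 0 (PySem.Str.len num - 2) 1).foldl
      (fun acc i => if l1.contains (PySem.Str.slice num (some i) (some (i+3))) then
                      acc ++ [PySem.Str.slice num (some i) (some (i+3))] else acc) []
  if res = [] then ""
  else if res.all (fun x => (PySem.Int.ofStr? x).getD 0 == 0) then "000"
  else
    let int_arr : List Int := res.foldl (fun acc x => acc ++ [(PySem.Int.ofStr? x).getD 0]) []
    match PySem.List.max? int_arr (fun y => y) with
    | some m => PySem.Int.toStr m
    | none => ""

-- ===== PORT B =====
def altGo (num : String) : List Int → String
  | [] => ""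
  | d :: rest =>
    let triple := String.ofList (PySem.List.pyRepeat (PySem.Int.toChars d) 3)
    if PySem.Str.isIn triple num then triple else altGo num rest

def largestGoodInteger_alt (num : String) : String :=
  altGo num (PySem.List.pyRange 9 (-1) (-1))

-- ===== PRECONDITION & SPEC =====
def Spec_largestGoodInteger (num : String) (out : String) : Prop := out = largestGoodInteger_alt num
instance (num : String) (out : String) : Decidable (Spec_largestGoodInteger num out) := by unfold Spec_largestGoodInteger; infer_instance

-- ===== CLAIM (what is proved, stated in full; the proofs are below) =====
def Claim_equal_largestGoodInteger : Prop := ∀ (num : String), Dom_largestGoodInteger num → Spec_largestGoodInteger num (largestGoodInteger num)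

-- ===== LEMMAS AND PROOFS =====
def l1c : List String := ["111","222","333","444","555","666","777","888","999","000"]

def resOf (num : String) : List String :=
  (PySem.List.pyRange 0 (PySem.Str.len num - 2) 1).foldl
      (fun acc i => if l1c.contains (PySem.Str.slice num (some i) (some (i+3))) then
                      acc ++ [PySem.Str.slice num (some i) (some (i+3))] else acc) []

def valOf (x : String) : Int := (PySem.Int.ofStr? x).getD 0

def tripS (d : Nat) : String := String.ofList (PySem.List.pyRepeat (PySem.Int.toChars (d : Int)) 3)

lemma A_unfold (num : String) : largestGoodInteger num =
    (if resOf num = [] then ""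
     else if (resOf num).all (fun x => valOf x == 0) then "000"
     else match PySem.List.max? ((resOf num).foldl (fun acc x => acc ++ [valOf x]) []) (fun y => y) with
          | some m => PySem.Int.toStr m
          | none => "") := rfl

lemma l1_len (t : String) (ht : t ∈ l1c) : t.toList.length = 3 := by
  fin_cases ht <;> decide

lemma l1_cases (t : String) (ht : t ∈ l1c) :
    ∃ d : Nat, d ≤ 9 ∧ t = tripS d ∧ valOf t = 111 * d := by
  fin_cases ht
  · exact ⟨1, by decide, by decide, by decide⟩
  · exact ⟨2, by decide, by decide, by decide⟩
  · exact ⟨3, by decide, by decide, by decide⟩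
  · exact ⟨4, by decide, by decide, by decide⟩
  · exact ⟨5, by decide, by decide, by decide⟩
  · exact ⟨6, by decide, by decide, by decide⟩
  · exact ⟨7, by decide, by decide, by decide⟩
  · exact ⟨8, by decide, by decide, by decide⟩
  · exact ⟨9, by decide, by decide, by decide⟩
  · exact ⟨0, by decide, by decide, by decide⟩

lemma trip_mem_l1 (d : Nat) (hd : d ≤ 9) : tripS d ∈ l1c := by
  interval_cases d <;> decide

lemma trip_val (d : Nat) (hd : d ≤ 9) : valOf (tripS d) = 111 * d := by
  interval_cases d <;> decide

lemma trip_toStr (d : Nat) (h1 : 1 ≤ d) (hd : d ≤ 9) :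
    PySem.Int.toStr (111 * (d : Nat) : Int) = tripS d := by
  interval_cases d <;> decide

lemma mem_res_iff (num : String) (t : String) :
    t ∈ resOf num ↔ t ∈ l1c ∧ PySem.Str.isIn t num = true := by
  unfold resOf
  rw [PySem.List.foldl_append_if (p := fun i => l1c.contains (PySem.Str.slice num (some i) (some (i+3))))
      (f := fun i => PySem.Str.slice num (some i) (some (i+3)))]
  simp only [List.nil_append, List.mem_map, List.mem_filter, PySem.List.mem_pyRange_one]
  constructor
  · rintro ⟨i, ⟨⟨h0, h2⟩, hc⟩, rfl⟩
    refine ⟨List.mem_of_elem_eq_true hc, ?_⟩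
    rw [PySem.Str.isIn_eq,
        ← PySem.Chars.exists_prefix_drop_iff_isIn]
    refine ⟨i.toNat, ?_⟩
    have hsl : (PySem.Str.slice num (some i) (some (i+3))).toList
        = (num.toList.drop i.toNat).take ((i+3).toNat - i.toNat) := by
      rw [PySem.Str.toList_slice, PySem.Chars.slice_eq_listSlice,
          PySem.List.slice_toNat _ h0 (by omega)]
    rw [hsl]
    exact List.take_prefix _ _
  · rintro ⟨hmem, hin⟩
    rw [PySem.Str.isIn_eq, ← PySem.Chars.exists_prefix_drop_iff_isIn] at hin
    obtain ⟨j, hj⟩ := hin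
    have hlen3 : t.toList.length = 3 := l1_len t hmem
    have hjb : j + 3 ≤ num.toList.length := by
      have := List.IsPrefix.length_le hj
      rw [hlen3, List.length_drop] at this; omega
    have hslt : PySem.Str.slice num (some (j:Int)) (some ((j:Int)+3)) = t := by
      have hsl : (PySem.Str.slice num (some (j:Int)) (some ((j:Int)+3))).toList
          = (num.toList.drop j).take 3 := by
        rw [PySem.Str.toList_slice, PySem.Chars.slice_eq_listSlice,
            PySem.List.slice_toNat _ (by positivity) (by positivity)]
        congr 1; omega
      apply String.toList_inj.mp
      rw [hsl]
      have := List.prefix_iff_eq_take.mp hj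
      rw [hlen3] at this
      exact this.symm
    refine ⟨(j : Int), ⟨⟨by positivity, by rw [PySem.Str.len_eq]; omega⟩, ?_⟩, hslt⟩
    rw [hslt]
    exact List.elem_eq_true_of_mem hmem

lemma A_eq_of_max (num : String) (d : Nat) (hd : d ≤ 9)
    (hin : PySem.Str.isIn (tripS d) num = true)
    (hab : ∀ d', d < d' → d' ≤ 9 → PySem.Str.isIn (tripS d') num = false) :
    largestGoodInteger num = tripS d := by
  have hmem : tripS d ∈ resOf num := (mem_res_iff num (tripS d)).mpr ⟨trip_mem_l1 d hd, hin⟩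
  have hne : resOf num ≠ [] := by intro h; rw [h] at hmem; exact absurd hmem (List.not_mem_nil)
  have hdle : ∀ x ∈ resOf num, ∃ d', d' ≤ d ∧ x = tripS d' := by
    intro x hx
    obtain ⟨hl, hi⟩ := (mem_res_iff num x).mp hx
    obtain ⟨d', hd9, rfl, _⟩ := l1_cases x hl
    refine ⟨d', ?_, rfl⟩
    by_contra h; push Not at h
    rw [hab d' h hd9] at hi; exact Bool.false_ne_true hi
  rw [A_unfold, if_neg hne]
  rcases Nat.eq_zero_or_pos d with hz | hpos
  · subst hz
    rw [if_pos]
    · decide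
    · rw [List.all_eq_true]
      intro x hx
      obtain ⟨d', hle, rfl⟩ := hdle x hx
      have : d' = 0 := Nat.le_zero.mp hle
      subst this
      simp [trip_val 0 (by omega)]
  · rw [if_neg]
    · rw [PySem.List.foldl_append_singleton_eq_map, List.nil_append]
      have hvm : (111 * d : Int) ∈ (resOf num).map valOf := by
        refine List.mem_map.mpr ⟨tripS d, hmem, trip_val d hd⟩
      rcases hmax : PySem.List.max? ((resOf num).map valOf) (fun y => y) with _ | m
      · rw [PySem.List.max?_eq_none_iff] at hmax
        rw [hmax] at hvm; exact absurd hvm (List.not_mem_nil)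
      · have hle1 : (111 * d : Int) ≤ m := PySem.List.max?_isMax hmax _ hvm
        have hmm : m ∈ (resOf num).map valOf := PySem.List.max?_mem hmax
        obtain ⟨x, hx, rfl⟩ := List.mem_map.mp hmm
        obtain ⟨d', hle, rfl⟩ := hdle x hx
        have hle2 : valOf (tripS d') ≤ 111 * d := by
          rw [trip_val d' (le_trans hle hd)]
          have : (d' : Int) ≤ d := by exact_mod_cast hle
          nlinarith
        have hm : valOf (tripS d') = 111 * d := le_antisymm hle2 hle1
        rw [hm]
        exact trip_toStr d hpos hd
    · rw [List.all_eq_true]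
      push Not
      refine ⟨tripS d, hmem, ?_⟩
      rw [trip_val d hd]
      simp
      omega
  
lemma A_eq_empty (num : String)
    (h : ∀ d, d ≤ 9 → PySem.Str.isIn (tripS d) num = false) :
    largestGoodInteger num = "" := by
  rw [A_unfold, if_pos]
  rw [List.eq_nil_iff_forall_not_mem]
  intro x hx
  obtain ⟨hl, hi⟩ := (mem_res_iff num x).mp hx
  obtain ⟨d', hd9, rfl, _⟩ := l1_cases x hl
  rw [h d' hd9] at hi; exact Bool.false_ne_true hi

lemma altGo_down (num : String) (d : Nat) (hd : d ≤ 9)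
    (hin : PySem.Str.isIn (tripS d) num = true)
    (hab : ∀ d', d < d' → d' ≤ 9 → PySem.Str.isIn (tripS d') num = false) :
    ∀ k : Nat, d < k → k ≤ 10 →
      altGo num (PySem.List.pyRange ((k : Int) - 1) (-1) (-1)) = tripS d := by
  intro k
  induction k with
  | zero => intro h; omega
  | succ n ih =>
    intro hdn hn10
    push_cast
    rw [show ((n : Int) + 1 - 1) = (n : Int) by ring]
    rw [PySem.List.pyRange_neg_one_cons (by omega : (-1 : Int) < (n : Int))]
    show (if PySem.Str.isIn (tripS n) num then tripS n
          else altGo num (PySem.List.pyRange ((n : Int) - 1) (-1) (-1))) = tripS d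
    rcases Nat.lt_or_ge d n with hlt | hge
    · rw [hab n hlt (by omega), if_neg (by simp)]
      exact ih hlt (by omega)
    · have : d = n := by omega
      subst this
      rw [hin, if_pos rfl]

lemma altGo_down_empty (num : String)
    (h : ∀ d, d ≤ 9 → PySem.Str.isIn (tripS d) num = false) :
    ∀ k : Nat, k ≤ 10 →
      altGo num (PySem.List.pyRange ((k : Int) - 1) (-1) (-1)) = "" := by
  intro k
  induction k with
  | zero =>
    intro _
    rw [show ((0 : Nat) : Int) - 1 = -1 by norm_num,
        PySem.List.pyRange_neg_one_eq_nil (by omega)]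
    rfl
  | succ n ih =>
    intro hn10
    push_cast
    rw [show ((n : Int) + 1 - 1) = (n : Int) by ring]
    rw [PySem.List.pyRange_neg_one_cons (by omega : (-1 : Int) < (n : Int))]
    show (if PySem.Str.isIn (tripS n) num then tripS n
          else altGo num (PySem.List.pyRange ((n : Int) - 1) (-1) (-1))) = ""
    rw [h n (by omega), if_neg (by simp)]
    exact ih (by omega)

lemma B_eq_of_max (num : String) (d : Nat) (hd : d ≤ 9)
    (hin : PySem.Str.isIn (tripS d) num = true)
    (hab : ∀ d', d < d' → d' ≤ 9 → PySem.Str.isIn (tripS d') num = false) :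
    largestGoodInteger_alt num = tripS d := by
  unfold largestGoodInteger_alt
  rw [show (9 : Int) = ((10 : Nat) : Int) - 1 by norm_num]
  exact altGo_down num d hd hin hab 10 (by omega) (by omega)

lemma B_eq_empty (num : String)
    (h : ∀ d, d ≤ 9 → PySem.Str.isIn (tripS d) num = false) :
    largestGoodInteger_alt num = "" := by
  unfold largestGoodInteger_alt
  rw [show (9 : Int) = ((10 : Nat) : Int) - 1 by norm_num]
  exact altGo_down_empty num h 10 (by omega)

theorem pv_main (num : String) : largestGoodInteger num = largestGoodInteger_alt num := by
  by_cases h9 : PySem.Str.isIn (tripS 9) num = true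
  · have hab : ∀ d', 9 < d' → d' ≤ 9 → PySem.Str.isIn (tripS d') num = false := by
      intro d' hx1 hx2; omega
    rw [A_eq_of_max num 9 (by omega) h9 hab, B_eq_of_max num 9 (by omega) h9 hab]
  ·
    have f9 : PySem.Str.isIn (tripS 9) num = false := (Bool.not_eq_true _).mp h9
    by_cases h8 : PySem.Str.isIn (tripS 8) num = true
    · have hab : ∀ d', 8 < d' → d' ≤ 9 → PySem.Str.isIn (tripS d') num = false := by
        intro d' hx1 hx2; interval_cases d'
        exacts [f9]
      rw [A_eq_of_max num 8 (by omega) h8 hab, B_eq_of_max num 8 (by omega) h8 hab]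
    ·
      have f8 : PySem.Str.isIn (tripS 8) num = false := (Bool.not_eq_true _).mp h8
      by_cases h7 : PySem.Str.isIn (tripS 7) num = true
      · have hab : ∀ d', 7 < d' → d' ≤ 9 → PySem.Str.isIn (tripS d') num = false := by
          intro d' hx1 hx2; interval_cases d'
          exacts [f8, f9]
        rw [A_eq_of_max num 7 (by omega) h7 hab, B_eq_of_max num 7 (by omega) h7 hab]
      ·
        have f7 : PySem.Str.isIn (tripS 7) num = false := (Bool.not_eq_true _).mp h7
        by_cases h6 : PySem.Str.isIn (tripS 6) num = true
        · have hab : ∀ d', 6 < d' → d' ≤ 9 → PySem.Str.isIn (tripS d') num = false := by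
            intro d' hx1 hx2; interval_cases d'
            exacts [f7, f8, f9]
          rw [A_eq_of_max num 6 (by omega) h6 hab, B_eq_of_max num 6 (by omega) h6 hab]
        ·
          have f6 : PySem.Str.isIn (tripS 6) num = false := (Bool.not_eq_true _).mp h6
          by_cases h5 : PySem.Str.isIn (tripS 5) num = true
          · have hab : ∀ d', 5 < d' → d' ≤ 9 → PySem.Str.isIn (tripS d') num = false := by
              intro d' hx1 hx2; interval_cases d'
              exacts [f6, f7, f8, f9]
            rw [A_eq_of_max num 5 (by omega) h5 hab, B_eq_of_max num 5 (by omega) h5 hab]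
          ·
            have f5 : PySem.Str.isIn (tripS 5) num = false := (Bool.not_eq_true _).mp h5
            by_cases h4 : PySem.Str.isIn (tripS 4) num = true
            · have hab : ∀ d', 4 < d' → d' ≤ 9 → PySem.Str.isIn (tripS d') num = false := by
                intro d' hx1 hx2; interval_cases d'
                exacts [f5, f6, f7, f8, f9]
              rw [A_eq_of_max num 4 (by omega) h4 hab, B_eq_of_max num 4 (by omega) h4 hab]
            ·
              have f4 : PySem.Str.isIn (tripS 4) num = false := (Bool.not_eq_true _).mp h4
              by_cases h3 : PySem.Str.isIn (tripS 3) num = true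
              · have hab : ∀ d', 3 < d' → d' ≤ 9 → PySem.Str.isIn (tripS d') num = false := by
                  intro d' hx1 hx2; interval_cases d'
                  exacts [f4, f5, f6, f7, f8, f9]
                rw [A_eq_of_max num 3 (by omega) h3 hab, B_eq_of_max num 3 (by omega) h3 hab]
              ·
                have f3 : PySem.Str.isIn (tripS 3) num = false := (Bool.not_eq_true _).mp h3
                by_cases h2 : PySem.Str.isIn (tripS 2) num = true
                · have hab : ∀ d', 2 < d' → d' ≤ 9 → PySem.Str.isIn (tripS d') num = false := by
                    intro d' hx1 hx2; interval_cases d'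
                    exacts [f3, f4, f5, f6, f7, f8, f9]
                  rw [A_eq_of_max num 2 (by omega) h2 hab, B_eq_of_max num 2 (by omega) h2 hab]
                ·
                  have f2 : PySem.Str.isIn (tripS 2) num = false := (Bool.not_eq_true _).mp h2
                  by_cases h1 : PySem.Str.isIn (tripS 1) num = true
                  · have hab : ∀ d', 1 < d' → d' ≤ 9 → PySem.Str.isIn (tripS d') num = false := by
                      intro d' hx1 hx2; interval_cases d'
                      exacts [f2, f3, f4, f5, f6, f7, f8, f9]
                    rw [A_eq_of_max num 1 (by omega) h1 hab, B_eq_of_max num 1 (by omega) h1 hab]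
                  ·
                    have f1 : PySem.Str.isIn (tripS 1) num = false := (Bool.not_eq_true _).mp h1
                    by_cases h0 : PySem.Str.isIn (tripS 0) num = true
                    · have hab : ∀ d', 0 < d' → d' ≤ 9 → PySem.Str.isIn (tripS d') num = false := by
                        intro d' hx1 hx2; interval_cases d'
                        exacts [f1, f2, f3, f4, f5, f6, f7, f8, f9]
                      rw [A_eq_of_max num 0 (by omega) h0 hab, B_eq_of_max num 0 (by omega) h0 hab]
                    ·
                      have f0 : PySem.Str.isIn (tripS 0) num = false := (Bool.not_eq_true _).mp h0
                      have hall : ∀ d, d ≤ 9 → PySem.Str.isIn (tripS d) num = false := by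
                        intro d hd; interval_cases d
                        exacts [f0, f1, f2, f3, f4, f5, f6, f7, f8, f9]
                      rw [A_eq_empty num hall, B_eq_empty num hall]

-- ===== VERDICT (by name: the statement is the Claim_ definition above) =====
theorem largestGoodInteger_spec : Claim_equal_largestGoodInteger := by
  intro num _
  unfold Spec_largestGoodInteger
  exact pv_main num
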